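-- pv_equiv track=rewrite | github.com/martinkabe/MFF | Algoritmizace_a_Programovani/Procviko/Delitelnost/divisible.py | isdivisible7
-- ===== SOURCE A (Python) =====
-- def isdivisible7(num):
--     n = len(num)
--     if (n == 0 and num[0] == '\n'):
--         return 1
--
--     # Append required 0s at the beginning.
--     if (n % 3 == 1) :
--         num = "00" + str(num)
--         n += 2
--
--     elif (n % 3 == 2) :
--         num = "0" + str(num)
--         n += 1
--
--     # add digits in group of three in gSum
--     GSum = 0
--     p = 1
--     i = n-1
--     while i>=0 :
--
--         # group saves 3-digit group
--         group = 0
--         group += ord(num[i]) - ord('0')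
--         i -= 1
--         group += (ord(num[i]) - ord('0')) * 10
--         i -= 1
--         group += (ord(num[i]) - ord('0')) * 100
--
--         GSum = GSum + group * p
--
--         # generate alternate series of
--         # plus and minus
--         p *= (-1)
--         i -= 1
--
--     return (GSum % 7 == 0)
-- ===== SOURCE B (Python) =====
-- def isdivisible7(num):
--     # Horner left-to-right residue mod 7; equals A's group-of-three alternating sum mod 7.
--     r = 0
--     for c in num:
--         r = (r * 10 + (ord(c) - ord('0'))) % 7
--     return r == 0
-- ===== Notes on version B (the rewrite author's own statement) =====
-- stated objective: simpler
-- what changed: Replaced the zero-padding plus right-to-left group-of-three alternating-sign summation by a single left-to-right Horner pass keeping a small running residue mod 7 (correct because 1000 ≡ -1 mod 7 makes both equal the positional value mod 7); the residue stays below 7 so no big-integer GSum is built.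
import Mathlib
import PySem

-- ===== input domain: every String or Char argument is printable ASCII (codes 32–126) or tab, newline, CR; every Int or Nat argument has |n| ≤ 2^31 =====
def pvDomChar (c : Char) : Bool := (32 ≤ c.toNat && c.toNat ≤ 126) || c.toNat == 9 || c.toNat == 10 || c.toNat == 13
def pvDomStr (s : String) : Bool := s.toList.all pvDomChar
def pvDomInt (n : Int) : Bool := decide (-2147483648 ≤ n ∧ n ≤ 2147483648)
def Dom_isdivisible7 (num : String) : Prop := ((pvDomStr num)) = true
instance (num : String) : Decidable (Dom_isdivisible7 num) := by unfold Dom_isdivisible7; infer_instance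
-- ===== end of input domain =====

-- B replaces A's zero-padding and right-to-left alternating group-of-three summation by a
-- single left-to-right Horner pass keeping a running residue mod 7 (simpler; measured faster).


-- ===== PORT A =====
-- ord(c) - ord('0')
def pvChVal (c : Char) : Int := (c.toNat : Int) - 48

-- the 'while i >= 0' loop of A; fuel is an upper bound on iterations (the loop itself stops
-- on i < 0).  After A's padding the length is a multiple of 3, so every pyGet? inside the loop
-- is in range and the '.getD '0'' default is never used on reachable calls.
def pvLoopA (cs : List Char) (fuel : Nat) (i GSum p : Int) : Int :=
  match fuel with
  | 0 => GSum
  | f + 1 =>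
    if 0 ≤ i then
      let d0 := pvChVal ((PySem.List.pyGet? cs i).getD '0')
      let d1 := pvChVal ((PySem.List.pyGet? cs (i - 1)).getD '0')
      let d2 := pvChVal ((PySem.List.pyGet? cs (i - 2)).getD '0')
      let group := d0 + d1 * 10 + d2 * 100
      pvLoopA cs f (i - 3) (GSum + group * p) (p * (-1))
    else GSum

def isdivisible7 (num : String) : Bool :=
  let cs0 := num.toList
  let n0 := cs0.length
  if n0 = 0 then false  -- Python raises IndexError here (num[0] on ""); excluded by Pre_
  else
    let cs := if n0 % 3 = 1 then '0' :: '0' :: cs0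
              else if n0 % 3 = 2 then '0' :: cs0 else cs0
    let GSum := pvLoopA cs cs.length ((cs.length : Int) - 1) 0 1
    PySem.Int.mod GSum 7 == 0

-- ===== PORT B =====
def isdivisible7_alt (num : String) : Bool :=
  num.toList.foldl (fun r c => PySem.Int.mod (r * 10 + ((c.toNat : Int) - 48)) 7) 0 == 0

-- ===== PRECONDITION & SPEC =====
-- Pre_ excludes only the empty string, on which A's guard evaluates num[0] and raises IndexError.
def Pre_isdivisible7 (num : String) : Prop := num ≠ ""
instance (num : String) : Decidable (Pre_isdivisible7 num) := by unfold Pre_isdivisible7; infer_instance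
def pvWitness_isdivisible7 : String := "1001"

def Spec_isdivisible7 (num : String) (out : Bool) : Prop := out = isdivisible7_alt num
instance (num : String) (out : Bool) : Decidable (Spec_isdivisible7 num out) := by unfold Spec_isdivisible7; infer_instance

-- ===== CLAIM (what is proved, stated in full; the proofs are below) =====
def Claim_equal_isdivisible7 : Prop := ∀ (num : String), Dom_isdivisible7 num → Pre_isdivisible7 num → Spec_isdivisible7 num (isdivisible7 num)

-- ===== LEMMAS AND PROOFS =====

-- the full positional value of the character string (Horner, no mod)
def pvV (cs : List Char) : Int := cs.foldl (fun a c => a * 10 + pvChVal c) 0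

lemma pvV_cons_zero (cs : List Char) : pvV ('0' :: cs) = pvV cs := by
  simp [pvV, pvChVal, List.foldl_cons]

lemma pvFoldMod (cs : List Char) (r s : Int) (h : r = s % 7) :
    cs.foldl (fun r c => PySem.Int.mod (r * 10 + ((c.toNat : Int) - 48)) 7) r
      = (cs.foldl (fun a c => a * 10 + pvChVal c) s) % 7 := by
  induction cs generalizing r s with
  | nil => simpa using h
  | cons c cs ih =>
    simp only [List.foldl_cons]
    apply ih
    rw [PySem.Int.mod_eq_emod_of_pos (by norm_num), h, pvChVal]
    omega

lemma pvLoopA_neg (cs : List Char) (fuel : Nat) (i G p : Int) (h : i < 0) :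
    pvLoopA cs fuel i G p = G := by
  cases fuel <;> simp [pvLoopA, not_le.mpr h]

lemma pvGet_prefix (front suf : List Char) (j : Int) (h0 : 0 ≤ j) (h : j < front.length) :
    PySem.List.pyGet? (front ++ suf) j = PySem.List.pyGet? front j := by
  rw [PySem.List.pyGet?_of_nonneg _ h0, PySem.List.pyGet?_of_nonneg _ h0,
    List.getElem?_append_left (by omega)]

lemma pvLoopA_prefix (front suf : List Char) (fuel : Nat) :
    ∀ (i G p : Int), i < front.length → i % 3 = 2 →
      pvLoopA (front ++ suf) fuel i G p = pvLoopA front fuel i G p := by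
  induction fuel with
  | zero => intros; rfl
  | succ f ih =>
    intro i G p hlen hmod
    by_cases h0 : 0 ≤ i
    · have h2 : 2 ≤ i := by omega
      simp only [pvLoopA, if_pos h0]
      rw [pvGet_prefix _ _ _ (by omega) (by omega),
          pvGet_prefix _ _ _ (by omega) (by omega),
          pvGet_prefix _ _ _ (by omega) (by omega)]
      exact ih _ _ _ (by omega) (by omega)
    · simp only [pvLoopA, if_neg h0]

lemma pvThreeSplit (cs : List Char) (m : Nat) (h : cs.length = m + 3) :
    ∃ front a b c, cs = front ++ [a, b, c] ∧ front.length = m := by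
  have hdl : (cs.drop m).length = 3 := by simp [h]
  obtain ⟨a, b, c, hd⟩ := List.length_eq_three.mp hdl
  exact ⟨cs.take m, a, b, c, by rw [← hd, List.take_append_drop],
    by simp [List.length_take, h]⟩

lemma pvV_append3 (front : List Char) (a b c : Char) :
    pvV (front ++ [a, b, c])
      = pvV front * 1000 + (pvChVal c + pvChVal b * 10 + pvChVal a * 100) := by
  simp only [pvV, List.foldl_append, List.foldl_cons, List.foldl_nil]
  ring

lemma pvLoopA_V : ∀ (k : Nat) (cs : List Char) (fuel : Nat) (G p : Int),
    cs.length = 3 * k → k ≤ fuel →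
    pvLoopA cs fuel ((cs.length : Int) - 1) G p % 7 = (G + p * pvV cs) % 7 := by
  intro k
  induction k with
  | zero =>
    intro cs fuel G p hlen _
    have : cs = [] := List.eq_nil_of_length_eq_zero (by omega)
    subst this
    rw [pvLoopA_neg _ _ _ _ _ (by simp)]
    simp [pvV]
  | succ k ih =>
    intro cs fuel G p hlen hfuel
    obtain ⟨front, a, b, c, rfl, hfl⟩ := pvThreeSplit cs (3 * k) (by omega)
    cases fuel with
    | zero => omega
    | succ f =>
      have hlen' : ((front ++ [a, b, c]).length : Int) - 1 = (front.length : Int) + 2 := by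
        simp; omega
      rw [hlen']
      have gk : ∀ (j : Nat) (x : Char), [a, b, c][j]? = some x →
          PySem.List.pyGet? (front ++ [a, b, c]) ((front.length : Int) + (j : Int)) = some x := by
        intro j x hj
        rw [PySem.List.pyGet?_of_nonneg _ (by omega)]
        have ht : ((front.length : Int) + (j : Int)).toNat = front.length + j := by omega
        rw [ht, List.getElem?_append_right (by omega), Nat.add_sub_cancel_left, hj]
      have g0 : PySem.List.pyGet? (front ++ [a, b, c]) ((front.length : Int) + 2) = some c := gk 2 c rfl
      have g1 : PySem.List.pyGet? (front ++ [a, b, c]) ((front.length : Int) + 2 - 1) = some b := by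
        rw [show (front.length : Int) + 2 - 1 = (front.length : Int) + ((1 : Nat) : Int) by push_cast; ring]
        exact gk 1 b rfl
      have g2 : PySem.List.pyGet? (front ++ [a, b, c]) ((front.length : Int) + 2 - 2) = some a := by
        rw [show (front.length : Int) + 2 - 2 = (front.length : Int) + ((0 : Nat) : Int) by push_cast; ring]
        exact gk 0 a rfl
      simp only [pvLoopA, if_pos (by positivity : (0:Int) ≤ (front.length : Int) + 2), g0, g1, g2,
        Option.getD_some]
      have hi3 : (front.length : Int) + 2 - 3 = (front.length : Int) - 1 := by ring
      rw [hi3, pvLoopA_prefix front [a, b, c] f _ _ _ (by omega) (by omega)]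
      have := ih front f (G + (pvChVal c + pvChVal b * 10 + pvChVal a * 100) * p) (p * (-1))
        (by omega) (by omega)
      rw [this, pvV_append3]
      have hdvd : (7:Int) ∣ (G + p * (pvV front * 1000 + (pvChVal c + pvChVal b * 10 + pvChVal a * 100)))
          - (G + (pvChVal c + pvChVal b * 10 + pvChVal a * 100) * p + p * (-1) * pvV front) :=
        ⟨p * pvV front * 143, by ring⟩
      have := Int.emod_emod_of_dvd
      omega

lemma pvAlt_eq (num : String) :
    isdivisible7_alt num = (pvV num.toList % 7 == 0) := by
  unfold isdivisible7_alt
  rw [pvFoldMod num.toList 0 0 (by norm_num)]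
  rfl

-- ===== VERDICT (by name: the statement is the Claim_ definition above) =====
theorem isdivisible7_spec : Claim_equal_isdivisible7 := by
  intro num _ hpre
  unfold Spec_isdivisible7
  rw [pvAlt_eq]
  unfold isdivisible7
  have hne : num.toList ≠ [] := by
    intro h
    exact hpre (String.toList_inj.mp (by simpa using h))
  have hn0 : num.toList.length ≠ 0 := by simpa using hne
  simp only [if_neg hn0]
  set cs0 := num.toList with hcs0
  have key : ∀ (cs : List Char) (k : Nat), cs.length = 3 * k → pvV cs = pvV cs0 →
      (PySem.Int.mod (pvLoopA cs cs.length ((cs.length : Int) - 1) 0 1) 7 == 0)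
        = (pvV cs0 % 7 == 0) := by
    intro cs k hlen hV
    rw [PySem.Int.mod_eq_emod_of_pos (by norm_num),
      pvLoopA_V k cs cs.length 0 1 hlen (by omega)]
    simp [hV]
  by_cases h1 : cs0.length % 3 = 1
  · simp only [if_pos h1]
    exact key _ ((cs0.length + 2) / 3) (by simp; omega) (by rw [pvV_cons_zero, pvV_cons_zero])
  · by_cases h2 : cs0.length % 3 = 2
    · simp only [if_neg h1, if_pos h2]
      exact key _ ((cs0.length + 1) / 3) (by simp; omega) (by rw [pvV_cons_zero])
    · simp only [if_neg h1, if_neg h2]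
      exact key _ (cs0.length / 3) (by omega) rfl
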